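-- pv_equiv track=rewrite | github.com/psilabvnorg/psi-ai-content-hub | python_api/REUP-YOUTUBE/src/multilingual_video_pipeline/services/video_ingestion.py | _convert_vtt_to_srt
-- ===== SOURCE A (Python) =====
-- def _convert_vtt_to_srt(vtt_content: str) -> str:
--     """
--     Convert VTT subtitle content to SRT format.
--
--     Args:
--         vtt_content: VTT file content
--
--     Returns:
--         SRT formatted content
--     """
--     lines = vtt_content.split('\n')
--     srt_lines = []
--     subtitle_count = 0
--
--     i = 0
--     while i < len(lines):
--         line = lines[i].strip()
--
--         # Skip VTT header and empty lines
--         if line.startswith('WEBVTT') or line.startswith('NOTE') or not line: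
--             i += 1
--             continue
--
--         # Check if this is a timestamp line
--         if '-->' in line:
--             subtitle_count += 1
--
--             # Convert VTT timestamp format to SRT format
--             # VTT: 00:00:01.000 --> 00:00:04.000
--             # SRT: 00:00:01,000 --> 00:00:04,000
--             timestamp_line = line.replace('.', ',')
--
--             srt_lines.append(str(subtitle_count))
--             srt_lines.append(timestamp_line)
--
--             # Get subtitle text (next non-empty lines)
--             i += 1
--             subtitle_text = []
--             while i < len(lines) and lines[i].strip():
--                 subtitle_text.append(lines[i].strip())
--                 i += 1
--
--             srt_lines.extend(subtitle_text)
--             srt_lines.append('')  # Empty line between subtitles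
--         else:
--             i += 1
--
--     return '\n'.join(srt_lines)
-- ===== SOURCE B (Python) =====
-- def _convert_vtt_to_srt(vtt_content: str) -> str:
--     """Convert VTT subtitle content to SRT format (block-based re-implementation)."""
--     out = []
--     count = 0
--     block = []
--     for raw in vtt_content.split('\n') + ['']:
--         s = raw.strip()
--         if s:
--             block.append(s)
--             continue
--         # end of block: find the timestamp line, emit a cue if there is one
--         for j, l in enumerate(block):
--             if '-->' in l and not l.startswith('WEBVTT') and not l.startswith('NOTE'):
--                 count += 1
--                 out.append(str(count))
--                 out.append(l.replace('.', ','))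
--                 out.extend(block[j + 1:])
--                 out.append('')
--                 break
--         block = []
--     return '\n'.join(out)
-- ===== Notes on version B (the rewrite author's own statement) =====
-- stated objective: alternative
-- what changed: Replaces A's index-driven while loop with a nested text-consuming inner loop by a single pass that groups the lines into blank-separated blocks and emits each cue from its finished block (first non-header '-->' line is the timestamp, the rest of the block is the text).
import Mathlib
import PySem

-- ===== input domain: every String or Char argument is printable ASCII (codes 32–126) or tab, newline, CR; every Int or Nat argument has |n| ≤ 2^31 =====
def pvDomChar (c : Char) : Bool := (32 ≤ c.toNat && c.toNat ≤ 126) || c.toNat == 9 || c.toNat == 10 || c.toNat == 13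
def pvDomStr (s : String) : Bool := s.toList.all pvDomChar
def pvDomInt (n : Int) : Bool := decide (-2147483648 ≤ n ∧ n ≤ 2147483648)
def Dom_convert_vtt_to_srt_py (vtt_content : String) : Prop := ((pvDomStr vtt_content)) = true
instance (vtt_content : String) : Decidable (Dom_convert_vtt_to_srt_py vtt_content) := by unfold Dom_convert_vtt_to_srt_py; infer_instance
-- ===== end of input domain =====

-- B converts VTT to SRT by splitting the lines into blank-separated blocks and emitting each
-- cue from its block, instead of A's index-driven while loop with a nested text-consuming loop;
-- objective: alternative (same cost, different decomposition).

-- ===== PORT A =====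
-- inner while loop of A: consume (stripped) non-empty lines, return (text, remaining lines)
def pvTakeText : List String → (List String × List String)
  | [] => ([], [])
  | l :: rest =>
    if PySem.Str.strip l ≠ "" then
      let p := pvTakeText rest
      (PySem.Str.strip l :: p.1, p.2)
    else ([], l :: rest)

-- needed by aLoop's termination proof
theorem pvTakeText_snd_len : ∀ ls : List String, (pvTakeText ls).2.length ≤ ls.length := by
  intro ls
  induction ls with
  | nil => simp [pvTakeText]
  | cons l rest ih =>
    simp only [pvTakeText]
    split
    · simpa using Nat.le_succ_of_le ih
    · simp

def aLoop : List String → Int → List String → List String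
  | [], _, acc => acc
  | l :: rest, count, acc =>
    let line := PySem.Str.strip l
    if PySem.Str.startswith line "WEBVTT" || PySem.Str.startswith line "NOTE" || line == "" then
      aLoop rest count acc
    else if PySem.Str.isIn "-->" line then
      let p := pvTakeText rest
      aLoop p.2 (count + 1)
        ((acc ++ [PySem.Int.toStr (count + 1), PySem.Str.replace line "." ","]) ++ p.1 ++ [""])
    else
      aLoop rest count acc
termination_by ls _ _ => ls.length
decreasing_by
  · simp
  · exact Nat.lt_succ_of_le (pvTakeText_snd_len rest)
  · simp

-- vtt_content.split('\n'): the "\n" separator is never empty, so split? is always some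
def convert_vtt_to_srt_py (vtt_content : String) : String :=
  PySem.Str.join "\n" (aLoop ((PySem.Str.split? vtt_content "\n").getD []) 0 [])

-- ===== PORT B =====
-- a line is the timestamp line of its block iff it contains '-->' and is not a header line
def pvElig (l : String) : Bool :=
  PySem.Str.isIn "-->" l && !PySem.Str.startswith l "WEBVTT" && !PySem.Str.startswith l "NOTE"

-- the inner for/enumerate/break of B: first eligible line of the block and the lines after it
def pvFindTs : List String → Option (String × List String)
  | [] => none
  | l :: rest => if pvElig l then some (l, rest) else pvFindTs rest

-- process one finished block: returns (new output, new count)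
def pvProc (block : List String) (count : Int) (out : List String) : List String × Int :=
  match pvFindTs block with
  | some (l, after) =>
      ((out ++ [PySem.Int.toStr (count + 1), PySem.Str.replace l "." ","]) ++ after ++ [""], count + 1)
  | none => (out, count)

def bLoop : List String → List String → Int → List String → List String
  | [], _, _, out => out
  | raw :: rest, block, count, out =>
    let s := PySem.Str.strip raw
    if s ≠ "" then bLoop rest (block ++ [s]) count out
    else
      let p := pvProc block count out
      bLoop rest [] p.2 p.1

def convert_vtt_to_srt_py_alt (vtt_content : String) : String :=
  PySem.Str.join "\n" (bLoop ((PySem.Str.split? vtt_content "\n").getD [] ++ [""]) [] 0 [])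

-- ===== PRECONDITION & SPEC =====
def Spec_convert_vtt_to_srt_py (vtt_content : String) (out : String) : Prop := out = convert_vtt_to_srt_py_alt vtt_content
instance (vtt_content : String) (out : String) : Decidable (Spec_convert_vtt_to_srt_py vtt_content out) := by unfold Spec_convert_vtt_to_srt_py; infer_instance

-- ===== CLAIM (what is proved, stated in full; the proofs are below) =====
def Claim_equal_convert_vtt_to_srt_py : Prop := ∀ (vtt_content : String), Dom_convert_vtt_to_srt_py vtt_content → Spec_convert_vtt_to_srt_py vtt_content (convert_vtt_to_srt_py vtt_content)

-- ===== LEMMAS AND PROOFS =====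

theorem pvTakeText_snd_blank : ∀ ls x r, (pvTakeText ls).2 = x :: r → PySem.Str.strip x = "" := by
  intro ls
  induction ls with
  | nil => intro x r h; simp [pvTakeText] at h
  | cons l rest ih =>
    intro x r h
    by_cases hl : PySem.Str.strip l ≠ ""
    · exact ih x r (by simpa [pvTakeText, hl] using h)
    · rw [not_not] at hl
      simp [pvTakeText, hl] at h
      rw [← h.1, hl]

theorem pvFindTs_none (b : List String) (hb : ∀ l ∈ b, pvElig l = false) :
    pvFindTs b = none := by
  induction b with
  | nil => rfl
  | cons l rest ih =>
    simp [pvFindTs, hb l (by simp)]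
    exact ih fun l' hl' => hb l' (by simp [hl'])

theorem pvFindTs_append (b : List String) (s : String) (t : List String)
    (hb : ∀ l ∈ b, pvElig l = false) (hs : pvElig s = true) :
    pvFindTs (b ++ s :: t) = some (s, t) := by
  induction b with
  | nil => simp [pvFindTs, hs]
  | cons l rest ih =>
    simp only [List.cons_append, pvFindTs, hb l (by simp)]
    simp only [Bool.false_eq_true, if_false]
    exact ih fun l' hl' => hb l' (by simp [hl'])

-- bLoop consumes the (stripped) non-empty lines into the pending block, then processes it
theorem bLoop_text_nil : ∀ (rest blk : List String) (c : Int) (out : List String),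
    (pvTakeText rest).2 = [] →
    bLoop (rest ++ [""]) blk c out = (pvProc (blk ++ (pvTakeText rest).1) c out).1 := by
  intro rest
  induction rest with
  | nil =>
    intro blk c out _
    have h0 : PySem.Str.strip "" = "" := by decide
    simp [pvTakeText, bLoop, h0]
  | cons x r ih =>
    intro blk c out hsnd
    by_cases hx : PySem.Str.strip x ≠ ""
    · rw [show (pvTakeText (x :: r)) = (PySem.Str.strip x :: (pvTakeText r).1, (pvTakeText r).2)
        from by simp [pvTakeText, hx]] at hsnd ⊢
      simp only [List.cons_append, bLoop, if_pos hx]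
      rw [ih (blk ++ [PySem.Str.strip x]) c out hsnd, List.append_assoc]
      rfl
    · rw [not_not] at hx
      simp [pvTakeText, hx] at hsnd

theorem bLoop_text_cons : ∀ (rest : List String) (x : String) (r' blk : List String)
    (c : Int) (out : List String),
    (pvTakeText rest).2 = x :: r' →
    bLoop (rest ++ [""]) blk c out =
      bLoop (r' ++ [""]) [] (pvProc (blk ++ (pvTakeText rest).1) c out).2
        (pvProc (blk ++ (pvTakeText rest).1) c out).1 := by
  intro rest
  induction rest with
  | nil => intro x r' blk c out hsnd; simp [pvTakeText] at hsnd
  | cons y r ih =>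
    intro x r' blk c out hsnd
    by_cases hy : PySem.Str.strip y ≠ ""
    · rw [show (pvTakeText (y :: r)) = (PySem.Str.strip y :: (pvTakeText r).1, (pvTakeText r).2)
        from by simp [pvTakeText, hy]] at hsnd ⊢
      simp only [List.cons_append, bLoop, if_pos hy]
      rw [ih x r' (blk ++ [PySem.Str.strip y]) c out hsnd, List.append_assoc]
      rfl
    · rw [not_not] at hy
      rw [show (pvTakeText (y :: r)) = ([], y :: r) from by simp [pvTakeText, hy]] at hsnd ⊢
      obtain ⟨h1, h2⟩ := List.cons.injEq .. ▸ hsnd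
      subst h1; subst h2
      simp only [List.cons_append, bLoop, hy, ne_eq, not_true_eq_false, if_false]
      simp

theorem bLoop_main : ∀ (n : Nat) (ls : List String), ls.length ≤ n →
    ∀ (b : List String) (c : Int) (acc : List String), (∀ l ∈ b, pvElig l = false) →
    bLoop (ls ++ [""]) b c acc = aLoop ls c acc := by
  intro n
  induction n with
  | zero =>
    intro ls hls b c acc hb
    have : ls = [] := List.length_eq_zero_iff.mp (Nat.le_zero.mp hls)
    subst this
    have h0 : PySem.Str.strip "" = "" := by decide
    simp [bLoop, aLoop, h0, pvProc, pvFindTs_none b hb]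
  | succ n ih =>
    intro ls hls b c acc hb
    match ls with
    | [] =>
      have h0 : PySem.Str.strip "" = "" := by decide
      simp [bLoop, aLoop, h0, pvProc, pvFindTs_none b hb]
    | l :: rest =>
      have hrest : rest.length ≤ n := by simpa using hls
      by_cases hempty : PySem.Str.strip l = ""
      · -- blank line: A skips it, B processes the (ineligible) pending block
        have hA : (PySem.Str.startswith (PySem.Str.strip l) "WEBVTT" ||
            PySem.Str.startswith (PySem.Str.strip l) "NOTE" ||
            PySem.Str.strip l == "") = true := by rw [hempty]; decide
        rw [show aLoop (l :: rest) c acc = aLoop rest c acc by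
          simp only [aLoop]; rw [hA]; simp]
        simp only [List.cons_append, bLoop, hempty, ne_eq, not_true_eq_false, if_false,
          pvProc, pvFindTs_none b hb]
        exact ih rest hrest [] c acc (by simp)
      · by_cases hW : PySem.Str.startswith (PySem.Str.strip l) "WEBVTT" = true
        · -- WEBVTT header: A skips, B appends an ineligible line to the block
          have hW' := hW; simp at hW'
          rw [show aLoop (l :: rest) c acc = aLoop rest c acc by
            simp only [aLoop]; rw [show (PySem.Str.startswith (PySem.Str.strip l) "WEBVTT" ||
              PySem.Str.startswith (PySem.Str.strip l) "NOTE" ||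
              PySem.Str.strip l == "") = true by simp [hW']]; simp]
          simp only [List.cons_append, bLoop, if_pos hempty]
          exact ih rest hrest _ c acc (by
            intro l' hl'
            rcases List.mem_append.mp hl' with h | h
            · exact hb l' h
            · simp at h; subst h; simp [pvElig, hW'])
        · by_cases hN : PySem.Str.startswith (PySem.Str.strip l) "NOTE" = true
          · -- NOTE header: same as WEBVTT
            have hN' := hN; simp at hN'
            rw [show aLoop (l :: rest) c acc = aLoop rest c acc by
              simp only [aLoop]; rw [show (PySem.Str.startswith (PySem.Str.strip l) "WEBVTT" ||
                PySem.Str.startswith (PySem.Str.strip l) "NOTE" ||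
                PySem.Str.strip l == "") = true by simp [hN']]; simp]
            simp only [List.cons_append, bLoop, if_pos hempty]
            exact ih rest hrest _ c acc (by
              intro l' hl'
              rcases List.mem_append.mp hl' with h | h
              · exact hb l' h
              · simp at h; subst h; simp [pvElig, hN'])
          · have hW' := hW; simp at hW'
            have hN' := hN; simp at hN'
            have hskip : (PySem.Str.startswith (PySem.Str.strip l) "WEBVTT" ||
                PySem.Str.startswith (PySem.Str.strip l) "NOTE" ||
                PySem.Str.strip l == "") = false := by
              simp [hW', hN', hempty]
            by_cases hArr : PySem.Str.isIn "-->" (PySem.Str.strip l) = true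
            · -- timestamp line
              have hArr' := hArr; simp at hArr'
              have helig : pvElig (PySem.Str.strip l) = true := by
                simp [pvElig, hArr', hW', hN']
              have hAstep : aLoop (l :: rest) c acc =
                  aLoop (pvTakeText rest).2 (c + 1)
                    ((acc ++ [PySem.Int.toStr (c + 1),
                        PySem.Str.replace (PySem.Str.strip l) "." ","]) ++ (pvTakeText rest).1 ++ [""]) := by
                simp only [aLoop]; rw [hskip, hArr]; simp
              rw [hAstep]
              simp only [List.cons_append, bLoop, if_pos hempty]
              have hfind : pvFindTs ((b ++ [PySem.Str.strip l]) ++ (pvTakeText rest).1) =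
                  some (PySem.Str.strip l, (pvTakeText rest).1) := by
                rw [List.append_assoc]
                exact pvFindTs_append b _ _ hb helig
              rcases hsnd : (pvTakeText rest).2 with _ | ⟨x, r'⟩
              · rw [bLoop_text_nil rest (b ++ [PySem.Str.strip l]) c acc hsnd]
                simp only [pvProc, hfind]
                rw [aLoop]
              · have hxblank : PySem.Str.strip x = "" := pvTakeText_snd_blank rest x r' hsnd
                have hAx : (PySem.Str.startswith (PySem.Str.strip x) "WEBVTT" ||
                    PySem.Str.startswith (PySem.Str.strip x) "NOTE" ||
                    PySem.Str.strip x == "") = true := by rw [hxblank]; decide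
                have hr'len : r'.length ≤ n := by
                  have := pvTakeText_snd_len rest
                  rw [hsnd] at this
                  simp at this
                  omega
                rw [bLoop_text_cons rest x r' (b ++ [PySem.Str.strip l]) c acc hsnd]
                simp only [pvProc, hfind]
                rw [show ∀ acc', aLoop (x :: r') (c + 1) acc' = aLoop r' (c + 1) acc' from
                  fun acc' => by simp only [aLoop]; rw [hAx]; simp]
                exact ih r' hr'len [] (c + 1) _ (by simp)
            · -- non-header, non-timestamp, non-empty: A skips, B appends (ineligible)
              have hArr' := hArr; simp at hArr'
              rw [show aLoop (l :: rest) c acc = aLoop rest c acc by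
                simp only [aLoop]; rw [hskip, show PySem.Str.isIn "-->" (PySem.Str.strip l) = false
                  from by simpa using hArr]; simp]
              simp only [List.cons_append, bLoop, if_pos hempty]
              exact ih rest hrest _ c acc (by
                intro l' hl'
                rcases List.mem_append.mp hl' with h | h
                · exact hb l' h
                · simp at h; subst h; simp [pvElig, hArr'])

-- ===== VERDICT (by name: the statement is the Claim_ definition above) =====
theorem convert_vtt_to_srt_py_spec : Claim_equal_convert_vtt_to_srt_py := by
  intro vtt_content _
  unfold Spec_convert_vtt_to_srt_py convert_vtt_to_srt_py convert_vtt_to_srt_py_alt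
  rw [bLoop_main ((PySem.Str.split? vtt_content "\n").getD []).length _ le_rfl [] 0 [] (by simp)]
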